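-- pv_equiv track=rewrite | github.com/Rajshinde9909/ai | menu_csa.py | solve_map_coloring
-- ===== SOURCE A (Python) =====
-- def solve_map_coloring(graph, colors):
--     color_map = {}
--     def is_valid(node, color):
--         return all(color_map.get(neigh) != color for neigh in graph[node])
--     def backtrack(node_index):
--         if node_index == len(graph):
--             return True
--         node = list(graph.keys())[node_index]
--         for color in colors:
--             if is_valid(node, color):
--                 color_map[node] = color
--                 if backtrack(node_index + 1):
--                     return True
--                 del color_map[node]
--         return False
--     if backtrack(0):
--         return color_map
--     return None
-- ===== SOURCE B (Python) =====
-- def solve_map_coloring(graph, colors):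
--     """Pure backtracking over graph.items(): threads an explicit assignment list
--     instead of mutating a shared dict, precomputes each node's forbidden color
--     set from already-assigned neighbors, and returns the assignment directly."""
--     def extend(acc, remaining):
--         if not remaining:
--             return dict(acc)
--         node, neighbors = remaining[0]
--         assigned = dict(acc)
--         forbidden = {assigned[n] for n in neighbors if n in assigned}
--         for color in colors:
--             if color not in forbidden:
--                 result = extend(acc + [(node, color)], remaining[1:])
--                 if result is not None:
--                     return result
--         return None
--     return extend([], list(graph.items()))
-- ===== Notes on version B (the rewrite author's own statement) =====
-- stated objective: alternative
-- what changed: Replaces the mutable shared color_map dict with index recursion and del-on-backtrack by a pure recursion over graph.items() that threads an immutable assignment list, precomputes each node's forbidden color set from assigned neighbors, and returns the completed assignment directly instead of signalling success with a boolean.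
import Mathlib
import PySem

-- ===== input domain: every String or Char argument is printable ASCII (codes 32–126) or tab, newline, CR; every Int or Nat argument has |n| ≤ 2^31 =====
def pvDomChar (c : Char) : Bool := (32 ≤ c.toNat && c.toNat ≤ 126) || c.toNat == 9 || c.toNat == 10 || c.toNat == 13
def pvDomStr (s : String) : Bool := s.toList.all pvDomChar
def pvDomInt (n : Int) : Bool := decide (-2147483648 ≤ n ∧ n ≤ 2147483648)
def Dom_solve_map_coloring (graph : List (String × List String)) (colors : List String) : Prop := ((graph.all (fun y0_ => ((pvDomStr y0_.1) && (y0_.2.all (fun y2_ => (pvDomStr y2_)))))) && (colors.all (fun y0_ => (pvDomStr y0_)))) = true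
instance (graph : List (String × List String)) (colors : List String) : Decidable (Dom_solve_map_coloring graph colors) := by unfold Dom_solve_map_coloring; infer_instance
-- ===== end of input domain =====

-- B replaces A's mutable shared color_map/boolean-return backtracking by a pure recursion
-- over graph.items() threading an immutable assignment list (objective: alternative).


-- ===== PORT A =====
-- is_valid(node, color): all(color_map.get(neigh) != color for neigh in graph[node])
-- (graph[node] is always present when called, so getD [] is only a totality guard)
def pvIsValid (g : PySem.Dict String (List String)) (cm : PySem.Dict String String)
    (node color : String) : Bool :=
  ((g.get? node).getD []).all (fun neigh => !(cm.get? neigh == some color))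

-- backtrack(node_index): recursion on the suffix of list(graph.keys()); the mutated
-- color_map is threaded as state, so backtrack returns (success, color_map).
mutual
def pvBtNode (g : PySem.Dict String (List String)) (colors : List String) :
    List String → PySem.Dict String String → Bool × PySem.Dict String String
  | [], cm => (true, cm)
  | node :: rest, cm => pvBtColors g colors node rest colors cm
  termination_by l _ => (l.length, 0)
-- the 'for color in colors' loop; 'del color_map[node]' = erase on the returned state
def pvBtColors (g : PySem.Dict String (List String)) (colors : List String)
    (node : String) (rest : List String) :
    List String → PySem.Dict String String → Bool × PySem.Dict String String
  | [], cm => (false, cm)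
  | c :: cs, cm =>
    if pvIsValid g cm node c then
      let r := pvBtNode g colors rest (cm.insert node c)
      if r.1 then r else pvBtColors g colors node rest cs (r.2.erase node)
    else pvBtColors g colors node rest cs cm
  termination_by cs _ => (rest.length, cs.length + 1)
end

def solve_map_coloring (graph : List (String × List String)) (colors : List String) :
    Option (List (String × String)) :=
  let g := PySem.Dict.ofList graph
  let r := pvBtNode g colors g.keys PySem.Dict.empty
  if r.1 then some r.2.items else none

-- ===== PORT B =====
-- assigned = dict(acc); forbidden = {assigned[n] for n in neighbors if n in assigned}
def pvForbidden (acc : List (String × String)) (neighbors : List String) : PySem.Set String :=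
  PySem.Set.ofList (neighbors.filterMap (fun n => (PySem.Dict.ofList acc).get? n))

mutual
-- extend(acc, remaining)
def pvExtend (colors : List String) :
    List (String × String) → List (String × List String) → Option (List (String × String))
  | acc, [] => some (PySem.Dict.ofList acc).items
  | acc, (node, neighbors) :: rest =>
    pvTryColors colors node rest acc (pvForbidden acc neighbors) colors
  termination_by _ remaining => (remaining.length, 0)
-- the 'for color in colors: if color not in forbidden' loop
def pvTryColors (colors : List String) (node : String) (rest : List (String × List String))
    (acc : List (String × String)) (forbidden : PySem.Set String) :
    List String → Option (List (String × String))
  | [] => none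
  | c :: cs =>
    if forbidden.contains c then pvTryColors colors node rest acc forbidden cs
    else
      match pvExtend colors (acc ++ [(node, c)]) rest with
      | some result => some result
      | none => pvTryColors colors node rest acc forbidden cs
  termination_by cs => (rest.length, cs.length + 1)
end

def solve_map_coloring_alt (graph : List (String × List String)) (colors : List String) :
    Option (List (String × String)) :=
  pvExtend colors [] (PySem.Dict.ofList graph).items

-- ===== PRECONDITION & SPEC =====
def Spec_solve_map_coloring (graph : List (String × List String)) (colors : List String) (out : Option (List (String × String))) : Prop := out = solve_map_coloring_alt graph colors
instance (graph : List (String × List String)) (colors : List String) (out : Option (List (String × String))) : Decidable (Spec_solve_map_coloring graph colors out) := by unfold Spec_solve_map_coloring; infer_instance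

-- ===== CLAIM (what is proved, stated in full; the proofs are below) =====
def Claim_equal_solve_map_coloring : Prop := ∀ (graph : List (String × List String)) (colors : List String), Dom_solve_map_coloring graph colors → Spec_solve_map_coloring graph colors (solve_map_coloring graph colors)

-- ===== LEMMAS AND PROOFS =====

-- dict(acc) has exactly acc as items when acc's keys are distinct
lemma ofList_items_of_nodup (acc : List (String × String))
    (h : (acc.map Prod.fst).Nodup) : (PySem.Dict.ofList acc).items = acc := by
  have h2 : ∀ a ∈ acc, (PySem.Dict.empty : PySem.Dict String String).contains a.1 = false := by
    intro a _; exact PySem.Dict.contains_empty a.1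
  have := PySem.Dict.items_foldl_insert_fresh acc Prod.fst Prod.snd PySem.Dict.empty h2 h
  simpa [PySem.Dict.ofList, PySem.Dict.update, PySem.Dict.empty] using this

lemma ofList_eq_mk_of_nodup (acc : List (String × String))
    (h : (acc.map Prod.fst).Nodup) : PySem.Dict.ofList acc = PySem.Dict.mk acc :=
  PySem.Dict.ext (ofList_items_of_nodup acc h)

-- inserting a fresh key appends
lemma insert_fresh (acc : List (String × String)) (node c : String)
    (h : node ∉ acc.map Prod.fst) :
    (PySem.Dict.mk acc).insert node c = PySem.Dict.mk (acc ++ [(node, c)]) := by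
  have hc : (PySem.Dict.mk acc).contains node = false := by
    rw [PySem.Dict.contains_eq_decide_mem_keys]
    simp only [PySem.Dict.keys]
    exact decide_eq_false h
  simp [PySem.Dict.insert, hc]

-- erasing the freshly appended key restores the state
lemma erase_appended (acc : List (String × String)) (node c : String)
    (h : node ∉ acc.map Prod.fst) :
    (PySem.Dict.mk (acc ++ [(node, c)])).erase node = PySem.Dict.mk acc := by
  simp only [PySem.Dict.erase, List.filter_append]
  have h1 : acc.filter (fun p => !p.1 == node) = acc := by
    apply List.filter_eq_self.mpr
    intro p hp
    simp only [Bool.not_eq_eq_eq_not, Bool.not_true, beq_eq_false_iff_ne, ne_eq]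
    intro he; exact h (he ▸ List.mem_map_of_mem hp)
  simp [h1]

-- A's validity test = B's forbidden-set test
lemma valid_eq_not_forbidden (g : PySem.Dict String (List String))
    (acc : List (String × String)) (node c : String) (neighbors : List String)
    (hacc : (acc.map Prod.fst).Nodup)
    (hn : g.get? node = some neighbors) :
    pvIsValid g (PySem.Dict.mk acc) node c = !((pvForbidden acc neighbors).contains c) := by
  rw [pvForbidden, ofList_eq_mk_of_nodup acc hacc]
  have hmem : ((PySem.Set.ofList (neighbors.filterMap
      (fun n => (PySem.Dict.mk acc).get? n))).contains c = true)
      ↔ ∃ n ∈ neighbors, (PySem.Dict.mk acc).get? n = some c := by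
    rw [PySem.Set.contains_iff, PySem.Set.mem_ofList]
    simp [List.mem_filterMap]
  have hall : (pvIsValid g (PySem.Dict.mk acc) node c = true)
      ↔ ∀ n ∈ neighbors, ¬ ((PySem.Dict.mk acc).get? n = some c) := by
    simp [pvIsValid, hn, List.all_eq_true]
  cases hb : (PySem.Set.ofList (neighbors.filterMap
      (fun n => (PySem.Dict.mk acc).get? n))).contains c with
  | true =>
    obtain ⟨n, hn1, hn2⟩ := hmem.mp hb
    simp only [Bool.not_true]
    by_contra hv
    have : pvIsValid g (PySem.Dict.mk acc) node c = true := by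
      cases hvv : pvIsValid g (PySem.Dict.mk acc) node c
      · exact absurd hvv hv
      · rfl
    exact (hall.mp this) n hn1 hn2
  | false =>
    simp only [Bool.not_false]
    apply hall.mpr
    intro n hn1 hn2
    have hc := hmem.mpr ⟨n, hn1, hn2⟩
    rw [hb] at hc
    exact Bool.false_ne_true hc

-- main invariant: on a suffix l of g.items with state acc (fresh, distinct keys),
-- A's stateful search and B's pure search agree; on failure A's state is unchanged.
lemma main_invariant (g : PySem.Dict String (List String)) (colors : List String) :
    ∀ (l : List (String × List String)) (acc : List (String × String)),
    (acc.map Prod.fst ++ l.map Prod.fst).Nodup →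
    (∀ p ∈ l, g.get? p.1 = some p.2) →
    pvBtNode g colors (l.map Prod.fst) (PySem.Dict.mk acc) =
      (match pvExtend colors acc l with
       | some r => (true, PySem.Dict.mk r)
       | none => (false, PySem.Dict.mk acc)) := by
  intro l
  induction l with
  | nil =>
    intro acc hnd _
    have hacc : (acc.map Prod.fst).Nodup := by simpa using hnd
    simp [pvBtNode, pvExtend, ofList_items_of_nodup acc hacc]
  | cons p rest ih =>
    obtain ⟨node, neighbors⟩ := p
    intro acc hnd hg
    have hnode : g.get? node = some neighbors := hg _ (List.mem_cons_self)
    have hgrest : ∀ q ∈ rest, g.get? q.1 = some q.2 :=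
      fun q hq => hg q (List.mem_cons_of_mem _ hq)
    have hacc : (acc.map Prod.fst).Nodup := (List.nodup_append.mp hnd).1
    have hfresh : node ∉ acc.map Prod.fst := by
      intro hmem
      have h2 : node ∈ List.map Prod.fst ((node, neighbors) :: rest) := by simp
      exact (List.nodup_append.mp hnd).2.2 node hmem node h2 rfl
    simp only [List.map_cons, pvBtNode, pvExtend]
    -- inner induction over the colors still to try
    have inner : ∀ cs : List String,
        pvBtColors g colors node (rest.map Prod.fst) cs (PySem.Dict.mk acc) =
          (match pvTryColors colors node rest acc (pvForbidden acc neighbors) cs with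
           | some r => (true, PySem.Dict.mk r)
           | none => (false, PySem.Dict.mk acc)) := by
      intro cs
      induction cs with
      | nil => simp [pvBtColors, pvTryColors]
      | cons c cs' ihc =>
        rw [pvBtColors, pvTryColors,
            valid_eq_not_forbidden g acc node c neighbors hacc hnode]
        cases hb : (pvForbidden acc neighbors).contains c with
        | true => simpa using ihc
        | false =>
          simp only [Bool.not_false, if_true]
          rw [insert_fresh acc node c hfresh]
          have hnd' : ((acc ++ [(node, c)]).map Prod.fst ++ rest.map Prod.fst).Nodup := by
            simpa [List.append_assoc] using hnd
          rw [ih (acc ++ [(node, c)]) hnd' hgrest]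
          cases pvExtend colors (acc ++ [(node, c)]) rest with
          | some r => simp
          | none =>
            simp only []
            rw [erase_appended acc node c hfresh]
            exact ihc
    exact inner colors

-- ===== VERDICT (by name: the statement is the Claim_ definition above) =====
theorem solve_map_coloring_spec : Claim_equal_solve_map_coloring := by
  intro graph colors _
  unfold Spec_solve_map_coloring solve_map_coloring solve_map_coloring_alt
  have hnd : (([] : List (String × String)).map Prod.fst ++
      (PySem.Dict.ofList graph).items.map Prod.fst).Nodup := by
    simpa [PySem.Dict.keys] using PySem.Dict.nodup_keys_ofList graph
  have hg : ∀ p ∈ (PySem.Dict.ofList graph).items,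
      (PySem.Dict.ofList graph).get? p.1 = some p.2 := by
    rintro ⟨k, v⟩ hp
    exact PySem.Dict.get?_of_mem_items _ hp (PySem.Dict.nodup_keys_ofList graph)
  have hmain := main_invariant (PySem.Dict.ofList graph) colors
    (PySem.Dict.ofList graph).items [] hnd hg
  simp only [List.map_nil, List.nil_append] at hmain hnd
  have hkeys : (PySem.Dict.ofList graph).keys =
      (PySem.Dict.ofList graph).items.map Prod.fst := rfl
  have hempty : (PySem.Dict.empty : PySem.Dict String String) = PySem.Dict.mk [] := rfl
  dsimp only
  rw [hkeys, hempty, hmain]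
  cases pvExtend colors [] (PySem.Dict.ofList graph).items with
  | some r => simp
  | none => simp
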